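-- pv_equiv track=rewrite | github.com/zexxakaelion/MultyRoyale | core/analyzer.py | get_best_item_on_ground
-- ===== SOURCE A (Python) =====
-- from typing import Optional, List, Dict, Tuple
--
-- def get_best_item_on_ground(local_items: List[Dict],
--                              inventory: List[Dict]) -> Optional[Dict]:
--     """Find the most valuable item on the ground to pick up."""
--     if not local_items:
--         return None
--
--     equipped_names = {i.get("typeId", "") for i in inventory}
--
--     priority_order = [
--         # Best weapons first
--         lambda i: "katana" in i.get("item", {}).get("typeId", "").lower(),
--         lambda i: "sniper" in i.get("item", {}).get("typeId", "").lower(),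
--         lambda i: "sword" in i.get("item", {}).get("typeId", "").lower(),
--         lambda i: "pistol" in i.get("item", {}).get("typeId", "").lower(),
--         # Currency (always grab)
--         lambda i: i.get("item", {}).get("category") == "currency",
--         # Recovery items
--         lambda i: i.get("item", {}).get("category") == "recovery",
--         # Utility items
--         lambda i: i.get("item", {}).get("category") == "utility",
--         # Any weapon
--         lambda i: i.get("item", {}).get("category") == "weapon",
--     ]
--
--     for check in priority_order:
--         candidates = [item for item in local_items if check(item)]
--         if candidates:
--             return candidates[0]
--
--     return local_items[0] if local_items else None
-- ===== SOURCE B (Python) =====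
-- def get_best_item_on_ground(local_items, inventory):
--     """Find the most valuable item on the ground to pick up."""
--     if not local_items:
--         return None
--
--     equipped_names = {i.get("typeId", "") for i in inventory}  # kept from A (unused there too)
--
--     predicates = [
--         lambda i: "katana" in i.get("item", {}).get("typeId", "").lower(),
--         lambda i: "sniper" in i.get("item", {}).get("typeId", "").lower(),
--         lambda i: "sword" in i.get("item", {}).get("typeId", "").lower(),
--         lambda i: "pistol" in i.get("item", {}).get("typeId", "").lower(),
--         lambda i: i.get("item", {}).get("category") == "currency",
--         lambda i: i.get("item", {}).get("category") == "recovery",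
--         lambda i: i.get("item", {}).get("category") == "utility",
--         lambda i: i.get("item", {}).get("category") == "weapon",
--     ]
--
--     def rank(item):
--         for idx, check in enumerate(predicates):
--             if check(item):
--                 return idx
--         return len(predicates)
--
--     # one pass: keep the earliest item of strictly smallest rank
--     best = local_items[0]
--     best_rank = len(predicates)
--     for item in local_items:
--         r = rank(item)
--         if r < best_rank:
--             best, best_rank = item, r
--     return best
-- ===== Notes on version B (the rewrite author's own statement) =====
-- stated objective: alternative
-- what changed: A scans the whole item list once per predicate (up to 8 filtering passes, building a candidate list each time); B makes a single pass over the items, ranking each item by the index of the first predicate it satisfies and keeping the earliest strict minimum.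
import Mathlib
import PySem

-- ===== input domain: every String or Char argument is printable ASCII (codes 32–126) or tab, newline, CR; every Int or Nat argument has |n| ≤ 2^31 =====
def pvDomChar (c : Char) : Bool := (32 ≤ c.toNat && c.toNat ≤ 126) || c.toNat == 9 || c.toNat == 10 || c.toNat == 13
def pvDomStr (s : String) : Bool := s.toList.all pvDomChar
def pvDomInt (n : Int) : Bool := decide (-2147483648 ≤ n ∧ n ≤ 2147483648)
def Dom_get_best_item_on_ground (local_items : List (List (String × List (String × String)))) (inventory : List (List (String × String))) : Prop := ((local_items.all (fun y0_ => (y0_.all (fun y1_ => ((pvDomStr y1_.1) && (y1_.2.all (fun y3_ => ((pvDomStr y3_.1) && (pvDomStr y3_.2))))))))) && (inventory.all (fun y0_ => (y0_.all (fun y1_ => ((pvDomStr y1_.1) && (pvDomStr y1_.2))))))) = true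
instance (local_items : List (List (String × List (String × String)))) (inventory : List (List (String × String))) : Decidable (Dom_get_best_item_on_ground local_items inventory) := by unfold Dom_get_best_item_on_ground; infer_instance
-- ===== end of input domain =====

-- B replaces A's one-scan-per-predicate search (8 filtering passes) by a single pass that
-- ranks each item by the index of the first predicate it satisfies and keeps the earliest
-- strict minimum; same return value everywhere.

-- shared helper: the item type, and the priority predicates both Pythons define verbatim
abbrev PvItem := List (String × List (String × String))

-- i.get("item", {}).get("typeId", "").lower()
def pvTypeId (i : PvItem) : String :=
  PySem.Str.lower ((PySem.Dict.mk ((PySem.Dict.mk i).getD "item" [])).getD "typeId" "")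

-- i.get("item", {}).get("category")
def pvCategory (i : PvItem) : Option String :=
  (PySem.Dict.mk ((PySem.Dict.mk i).getD "item" [])).get? "category"

def pvPreds : List (PvItem → Bool) :=
  [ fun i => PySem.Str.isIn "katana" (pvTypeId i),
    fun i => PySem.Str.isIn "sniper" (pvTypeId i),
    fun i => PySem.Str.isIn "sword" (pvTypeId i),
    fun i => PySem.Str.isIn "pistol" (pvTypeId i),
    fun i => pvCategory i == some "currency",
    fun i => pvCategory i == some "recovery",
    fun i => pvCategory i == some "utility",
    fun i => pvCategory i == some "weapon" ]

-- ===== PORT A =====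
-- 'for check in priority_order: candidates = [… if check(item)]; if candidates: return candidates[0]'
def pvCandidatesLoop (local_items : List PvItem) : List (PvItem → Bool) → Option PvItem
  | [] => local_items.head?     -- 'return local_items[0] if local_items else None'
  | check :: rest =>
      let candidates := local_items.filter check
      if candidates.isEmpty then pvCandidatesLoop local_items rest else candidates.head?

def get_best_item_on_ground (local_items : List (List (String × List (String × String)))) (inventory : List (List (String × String))) : Option (List (String × List (String × String))) :=
  if local_items.isEmpty then none
  else
    let _equipped_names := PySem.Set.ofList (inventory.map (fun i => (PySem.Dict.mk i).getD "typeId" ""))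
    pvCandidatesLoop local_items pvPreds

-- ===== PORT B =====
-- rank(item) = index of the first predicate item satisfies, else len(predicates)
def pvRank : List (PvItem → Bool) → PvItem → Nat
  | [], _ => 0
  | check :: rest, i => if check i then 0 else pvRank rest i + 1

def get_best_item_on_ground_alt (local_items : List (List (String × List (String × String)))) (inventory : List (List (String × String))) : Option (List (String × List (String × String))) :=
  match local_items with
  | [] => none
  | first :: _ =>
      let _equipped_names := PySem.Set.ofList (inventory.map (fun i => (PySem.Dict.mk i).getD "typeId" ""))
      some ((local_items.foldl
        (fun best item =>
          let r := pvRank pvPreds item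
          if r < best.2 then (item, r) else best)
        (first, pvPreds.length)).1)

-- ===== PRECONDITION & SPEC =====
def Spec_get_best_item_on_ground (local_items : List (List (String × List (String × String)))) (inventory : List (List (String × String))) (out : Option (List (String × List (String × String)))) : Prop := out = get_best_item_on_ground_alt local_items inventory
instance (local_items : List (List (String × List (String × String)))) (inventory : List (List (String × String))) (out : Option (List (String × List (String × String)))) : Decidable (Spec_get_best_item_on_ground local_items inventory out) := by unfold Spec_get_best_item_on_ground; infer_instance

-- ===== CLAIM (what is proved, stated in full; the proofs are below) =====
def Claim_equal_get_best_item_on_ground : Prop := ∀ (local_items : List (List (String × List (String × String)))) (inventory : List (List (String × String))), Dom_get_best_item_on_ground local_items inventory → Spec_get_best_item_on_ground local_items inventory (get_best_item_on_ground local_items inventory)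

-- ===== LEMMAS AND PROOFS =====

-- minimum of (r x) over xs, capped by c
def pvM (r : PvItem → Nat) (c : Nat) (xs : List PvItem) : Nat :=
  xs.foldr (fun x m => min (r x) m) c

theorem pvM_nil (r : PvItem → Nat) (c : Nat) : pvM r c [] = c := rfl

theorem pvM_cons (r : PvItem → Nat) (c : Nat) (x : PvItem) (xs : List PvItem) :
    pvM r c (x :: xs) = min (r x) (pvM r c xs) := rfl

theorem pvM_min (r : PvItem → Nat) (a b : Nat) (xs : List PvItem) :
    pvM r (min a b) xs = min a (pvM r b xs) := by
  induction xs with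
  | nil => rfl
  | cons x xs ih => simp only [pvM_cons, ih]; omega

theorem pvM_le_of_mem (r : PvItem → Nat) (c : Nat) {x : PvItem} {xs : List PvItem}
    (h : x ∈ xs) : pvM r c xs ≤ r x := by
  induction xs with
  | nil => cases h
  | cons y ys ih =>
      rcases List.mem_cons.mp h with h | h
      · subst h; simp only [pvM_cons]; omega
      · have := ih h; simp only [pvM_cons]; omega

theorem pvM_le_cap (r : PvItem → Nat) (c : Nat) (xs : List PvItem) : pvM r c xs ≤ c := by
  induction xs with
  | nil => exact Nat.le_refl c
  | cons x xs ih => simp only [pvM_cons]; omega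

theorem find?_pvM_isSome (r : PvItem → Nat) :
    ∀ (xs : List PvItem) (c : Nat), pvM r c xs < c →
      ∃ y, xs.find? (fun x => r x == pvM r c xs) = some y := by
  intro xs
  induction xs with
  | nil => intro c h; simp [pvM_nil] at h
  | cons x xs ih =>
      intro c h
      by_cases hx : r x ≤ pvM r c xs
      · refine ⟨x, ?_⟩
        have hm : pvM r c (x :: xs) = r x := by simp only [pvM_cons]; omega
        rw [hm]; simp [List.find?]
      · have hm : pvM r c (x :: xs) = pvM r c xs := by simp only [pvM_cons]; omega
        rw [hm]
        have hlt : pvM r c xs < c := by rw [hm] at h; exact h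
        obtain ⟨y, hy⟩ := ih c hlt
        refine ⟨y, ?_⟩
        rw [List.find?_cons_of_neg, hy]
        simp; omega

theorem pvM_succ (r r' : PvItem → Nat) (c : Nat) (xs : List PvItem)
    (h : ∀ x ∈ xs, r' x = r x + 1) : pvM r' (c + 1) xs = pvM r c xs + 1 := by
  induction xs with
  | nil => rfl
  | cons x xs ih =>
      have hx := h x (by simp)
      have := ih (fun x hm => h x (by simp [hm]))
      simp only [pvM_cons, hx, this]; omega

theorem pvFind?_congr_mem {α : Type} (f g : α → Bool) (xs : List α)
    (h : ∀ x ∈ xs, f x = g x) : xs.find? f = xs.find? g := by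
  induction xs with
  | nil => rfl
  | cons x xs ih =>
      have hx := h x (by simp)
      simp only [List.find?, hx]
      cases g x
      · exact ih (fun y hy => h y (by simp [hy]))
      · rfl

theorem pvHead?_filter {α : Type} (p : α → Bool) (xs : List α) :
    (xs.filter p).head? = xs.find? p := by
  induction xs with
  | nil => rfl
  | cons x xs ih =>
      by_cases hx : p x
      · simp [List.filter, List.find?, hx]
      · simp only [List.filter, List.find?, Bool.not_eq_true] at *
        simp [hx, ih]

theorem pvRank_le (P : List (PvItem → Bool)) (x : PvItem) : pvRank P x ≤ P.length := by
  induction P with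
  | nil => exact Nat.le_refl 0
  | cons p ps ih =>
      simp only [pvRank, List.length_cons]
      split <;> omega

-- B's fold returns the earliest element attaining the capped minimum rank
theorem pvFold_spec (r : PvItem → Nat) :
    ∀ (xs : List PvItem) (b : PvItem) (br : Nat),
      (xs.foldl (fun best item => let rr := r item; if rr < best.2 then (item, rr) else best) (b, br)).1
        = if pvM r br xs < br then (xs.find? (fun x => r x == pvM r br xs)).getD b else b := by
  intro xs
  induction xs with
  | nil => intro b br; simp [pvM_nil]
  | cons x xs ih =>
      intro b br
      simp only [List.foldl_cons]
      by_cases hx : r x < br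
      · rw [if_pos hx]
        have hmin : pvM r (r x) xs = min (r x) (pvM r br xs) := by
          have h := pvM_min r (r x) br xs
          rwa [Nat.min_eq_left (Nat.le_of_lt hx)] at h
        have hM : pvM r br (x :: xs) = min (r x) (pvM r br xs) := pvM_cons r br x xs
        rw [ih x (r x), hM, ← hmin]
        have hle : pvM r (r x) xs ≤ r x := pvM_le_cap r (r x) xs
        by_cases h2 : pvM r (r x) xs < r x
        · -- a strictly better element lies in xs
          rw [if_pos h2, if_pos (by omega)]
          rw [List.find?_cons_of_neg (by simp; omega)]
          obtain ⟨y, hy⟩ := find?_pvM_isSome r xs (r x) h2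
          rw [hy]; rfl
        · -- x itself attains the minimum
          have hEq : pvM r (r x) xs = r x := by omega
          rw [if_neg h2, if_pos (by omega)]
          rw [List.find?_cons_of_pos (by simp [hEq])]
          rfl
      · rw [if_neg hx]
        have hM : pvM r br (x :: xs) = min (r x) (pvM r br xs) := pvM_cons r br x xs
        rw [ih b br, hM]
        by_cases h2 : pvM r br xs < br
        · have hEq : min (r x) (pvM r br xs) = pvM r br xs := by omega
          rw [if_pos h2, if_pos (by omega)]
          rw [List.find?_cons_of_neg (by simp [hEq]; omega)]
          rw [hEq]
        · rw [if_neg h2, if_neg (by omega)]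

-- A's predicate loop returns the earliest element of minimal rank
theorem pvCandidatesLoop_spec :
    ∀ (P : List (PvItem → Bool)) (L : List PvItem), L ≠ [] →
      pvCandidatesLoop L P = L.find? (fun x => pvRank P x == pvM (pvRank P) P.length L) := by
  intro P
  induction P with
  | nil =>
      intro L hL
      have h0 : pvM (pvRank []) 0 L = 0 :=
        Nat.le_antisymm (pvM_le_cap _ _ _) (Nat.zero_le _)
      cases L with
      | nil => exact absurd rfl hL
      | cons x xs =>
          simp only [pvCandidatesLoop, List.length_nil, h0]
          rw [List.find?_cons_of_pos (by simp [pvRank])]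
          rfl
  | cons p ps ih =>
      intro L hL
      simp only [pvCandidatesLoop]
      by_cases he : (L.filter p).isEmpty
      · -- no element satisfies p: every rank is (rank w.r.t. ps) + 1
        rw [if_pos he]
        have hnone : ∀ x ∈ L, p x = false := by
          intro x hx
          by_contra hpx
          have : x ∈ L.filter p := List.mem_filter.mpr ⟨hx, by simpa using hpx⟩
          rw [List.isEmpty_iff] at he
          simp [he] at this
        have hsucc : ∀ x ∈ L, pvRank (p :: ps) x = pvRank ps x + 1 := by
          intro x hx; simp [pvRank, hnone x hx]
        have hM : pvM (pvRank (p :: ps)) (ps.length + 1) L = pvM (pvRank ps) ps.length L + 1 :=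
          pvM_succ _ _ _ _ hsucc
        rw [ih L hL]
        apply Eq.symm
        apply pvFind?_congr_mem
        intro x hx
        simp only [List.length_cons, hM, hsucc x hx]
        simp
      · -- some element satisfies p: minimum rank is 0, first such element wins
        rw [if_neg he]
        have ⟨x, hx⟩ : ∃ x ∈ L, p x := by
          rcases List.exists_mem_of_ne_nil (L.filter p)
            (by simpa [List.isEmpty_iff] using he) with ⟨x, hx⟩
          exact ⟨x, (List.mem_filter.mp hx).1, (List.mem_filter.mp hx).2⟩
        have hx0 : pvRank (p :: ps) x = 0 := by simp [pvRank, hx.2]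
        have hM : pvM (pvRank (p :: ps)) (p :: ps).length L = 0 := by
          have := pvM_le_of_mem (pvRank (p :: ps)) (p :: ps).length hx.1
          omega
        rw [pvHead?_filter, hM]
        apply Eq.symm
        apply pvFind?_congr_mem
        intro y _
        simp only [pvRank]
        cases hpy : p y <;> simp

-- ===== VERDICT (by name: the statement is the Claim_ definition above) =====
theorem get_best_item_on_ground_spec : Claim_equal_get_best_item_on_ground := by
  intro local_items inventory _dom
  unfold Spec_get_best_item_on_ground
  cases local_items with
  | nil => rfl
  | cons first rest =>
      unfold get_best_item_on_ground get_best_item_on_ground_alt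
      simp only [List.isEmpty_cons, if_neg (by simp : ¬ (false = true))]
      rw [pvCandidatesLoop_spec pvPreds (first :: rest) (by simp)]
      rw [pvFold_spec (pvRank pvPreds) (first :: rest) first pvPreds.length]
      by_cases h : pvM (pvRank pvPreds) pvPreds.length (first :: rest) < pvPreds.length
      · rw [if_pos h]
        obtain ⟨y, hy⟩ := find?_pvM_isSome (pvRank pvPreds) (first :: rest) pvPreds.length h
        rw [hy]; rfl
      · rw [if_neg h]
        have hcap : pvM (pvRank pvPreds) pvPreds.length (first :: rest) = pvPreds.length :=
          Nat.le_antisymm (pvM_le_cap _ _ _) (by omega)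
        have hfirst : pvRank pvPreds first = pvPreds.length := by
          have h1 := pvM_le_of_mem (pvRank pvPreds) pvPreds.length
            (by simp : first ∈ first :: rest)
          have h2 := pvRank_le pvPreds first
          omega
        rw [List.find?_cons_of_pos (by simp [hcap, hfirst])]
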